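-- pv_equiv track=rewrite | github.com/polsala/SPD03MozartEncrypt | mozart.py | create_fake_binary_assign
-- ===== SOURCE A (Python) =====
-- from itertools import product, chain
-- from functools import reduce
--
-- def create_fake_binary_assign(alphabet, permutation_size, index_start, index_jumps):
--     # mod rgb colors
--     res = {}
--     t_size = pow(2, permutation_size)
--     if index_jumps * len(alphabet) + index_start > t_size:
--         raise IndexError('Number of jumps invalid')
--     truth_table = list(product([0, 1], repeat=permutation_size))
--     indx_list = index_start - 1
--     for i, k in enumerate(alphabet):
--         # Generate a binary number from true table row
--         res[k] = reduce(lambda a, b: (a << 1) + int(b), truth_table[indx_list])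
--         indx_list += index_jumps
--
--     return res
-- ===== SOURCE B (Python) =====
-- def create_fake_binary_assign(alphabet, permutation_size, index_start, index_jumps):
--     # The i-th truth-table row, read as a binary number, IS its own index i
--     # (with Python's negative-index wraparound = modulo the table size), so the
--     # codes can be computed arithmetically without materialising the 2**n table.
--     t_size = pow(2, permutation_size)
--     if index_jumps * len(alphabet) + index_start > t_size:
--         raise IndexError('Number of jumps invalid')
--     return {ch: (index_start - 1 + i * index_jumps) % t_size
--             for i, ch in enumerate(alphabet)}
-- ===== Notes on version B (the rewrite author's own statement) =====
-- stated objective: faster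
-- what changed: B drops the 2**n truth table and the per-letter reduce entirely: a row of the truth table read as a binary number equals its own index, so each code is the closed form (index_start-1+i*index_jumps) % 2**permutation_size computed in a dict comprehension.
import Mathlib
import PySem

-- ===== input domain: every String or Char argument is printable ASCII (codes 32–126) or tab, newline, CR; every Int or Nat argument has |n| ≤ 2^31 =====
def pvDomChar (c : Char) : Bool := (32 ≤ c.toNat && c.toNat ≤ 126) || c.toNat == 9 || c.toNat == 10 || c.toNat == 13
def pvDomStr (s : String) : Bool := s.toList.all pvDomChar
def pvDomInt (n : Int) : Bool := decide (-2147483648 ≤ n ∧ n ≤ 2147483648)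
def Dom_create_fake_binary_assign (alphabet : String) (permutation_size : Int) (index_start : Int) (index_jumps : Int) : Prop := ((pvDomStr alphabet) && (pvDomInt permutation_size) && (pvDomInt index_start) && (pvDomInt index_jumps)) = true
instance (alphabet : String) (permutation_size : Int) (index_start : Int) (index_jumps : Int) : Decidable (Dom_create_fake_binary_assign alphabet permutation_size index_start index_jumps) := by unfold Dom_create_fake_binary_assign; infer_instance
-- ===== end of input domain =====

-- B replaces A's 2^n-row truth table and per-letter reduce by the closed form
-- (index_start-1+i*index_jumps) mod 2^n; the equivalence below is about the return value.

-- ===== PORT A =====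
-- truth_table = list(product([0, 1], repeat=permutation_size)): rightmost position varies fastest
def pvTruthTable : Nat → List (List Int)
  | 0 => [[]]
  | n + 1 => (pvTruthTable n).flatMap (fun t => [t ++ [0], t ++ [1]])

-- reduce(lambda a, b: (a << 1) + int(b), row); none = TypeError on the empty row
def pvReduce : List Int → Option Int
  | [] => none
  | a :: rest => some (rest.foldl (fun acc b => (acc <<< (1 : Nat)) + b) a)

-- the for-loop over alphabet: res[k] = reduce(..., truth_table[indx_list]); indx_list += index_jumps;
-- none = IndexError from truth_table[indx_list] or TypeError from reduce
def pvLoopA (table : List (List Int)) (jumps : Int) :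
    List Char → Int → PySem.Dict String Int → Option (PySem.Dict String Int)
  | [], _, res => some res
  | c :: cs, idx, res =>
    match (PySem.List.pyGet? table idx).bind pvReduce with
    | none => none
    | some v => pvLoopA table jumps cs (idx + jumps) (res.insert (String.singleton c) v)

def create_fake_binary_assign (alphabet : String) (permutation_size : Int) (index_start : Int) (index_jumps : Int) : List (String × Int) :=
  -- pow(2, permutation_size) is a float for negative exponents and product(repeat<0) raises
  -- ValueError: that path is outside Pre_ and returns [] here
  if permutation_size < 0 then []
  else
    let t_size : Int := 2 ^ permutation_size.toNat
    if index_jumps * (PySem.Str.len alphabet) + index_start > t_size then [] -- raise IndexError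
    else
      match pvLoopA (pvTruthTable permutation_size.toNat) index_jumps alphabet.toList (index_start - 1) PySem.Dict.empty with
      | none => []  -- IndexError/TypeError inside the loop; outside Pre_
      | some d => d.items

-- ===== PORT B =====
def create_fake_binary_assign_alt (alphabet : String) (permutation_size : Int) (index_start : Int) (index_jumps : Int) : List (String × Int) :=
  -- pow(2, permutation_size) is a float for negative exponents: outside Pre_, [] here
  if permutation_size < 0 then []
  else
    let t_size : Int := 2 ^ permutation_size.toNat
    if index_jumps * (PySem.Str.len alphabet) + index_start > t_size then [] -- raise IndexError
    else
      ((PySem.List.enumerate alphabet.toList 0).foldl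
        (fun d p => d.insert (String.singleton p.2)
          (PySem.Int.mod (index_start - 1 + p.1 * index_jumps) t_size))
        PySem.Dict.empty).items

-- ===== PRECONDITION & SPEC =====
-- Pre_ admits exactly the inputs where A returns: permutation_size ≥ 0 (else pow gives a float and
-- product raises ValueError), a nonempty truth-table row for each letter (permutation_size ≥ 1
-- unless alphabet is empty, else reduce raises TypeError), the explicit guard not triggered
-- (else IndexError), and every accessed index within Python's wraparound range (else IndexError).
def Pre_create_fake_binary_assign (alphabet : String) (permutation_size : Int) (index_start : Int) (index_jumps : Int) : Prop :=
  0 ≤ permutation_size ∧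
  (1 ≤ permutation_size ∨ alphabet.toList = []) ∧
  index_jumps * (alphabet.toList.length : Int) + index_start ≤ 2 ^ permutation_size.toNat ∧
  ∀ j ∈ List.range alphabet.toList.length,
    -(2 ^ permutation_size.toNat : Int) ≤ index_start - 1 + (j : Int) * index_jumps ∧
    index_start - 1 + (j : Int) * index_jumps < 2 ^ permutation_size.toNat

instance (alphabet : String) (permutation_size : Int) (index_start : Int) (index_jumps : Int) : Decidable (Pre_create_fake_binary_assign alphabet permutation_size index_start index_jumps) := by
  unfold Pre_create_fake_binary_assign; infer_instance

def pvWitness_create_fake_binary_assign : String × Int × Int × Int := ("abc", 3, 2, 2)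

def Spec_create_fake_binary_assign (alphabet : String) (permutation_size : Int) (index_start : Int) (index_jumps : Int) (out : List (String × Int)) : Prop := out = create_fake_binary_assign_alt alphabet permutation_size index_start index_jumps
instance (alphabet : String) (permutation_size : Int) (index_start : Int) (index_jumps : Int) (out : List (String × Int)) : Decidable (Spec_create_fake_binary_assign alphabet permutation_size index_start index_jumps out) := by unfold Spec_create_fake_binary_assign; infer_instance

-- ===== CLAIM (what is proved, stated in full; the proofs are below) =====
def Claim_equal_create_fake_binary_assign : Prop := ∀ (alphabet : String) (permutation_size : Int) (index_start : Int) (index_jumps : Int), Dom_create_fake_binary_assign alphabet permutation_size index_start index_jumps → Pre_create_fake_binary_assign alphabet permutation_size index_start index_jumps → Spec_create_fake_binary_assign alphabet permutation_size index_start index_jumps (create_fake_binary_assign alphabet permutation_size index_start index_jumps)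

-- ===== LEMMAS AND PROOFS =====

-- the truth-table row whose index is j, most-significant bit first
def pvBits : Nat → Nat → List Int
  | 0, _ => []
  | n + 1, j => pvBits n (j / 2) ++ [((j % 2 : Nat) : Int)]

theorem range_two_mul_map {α : Type} (g : Nat → α) :
    ∀ m, (List.range (2 * m)).map g
      = (List.range m).flatMap (fun k => [g (2 * k), g (2 * k + 1)]) := by
  intro m
  induction m with
  | zero => simp
  | succ m ih =>
    have h2 : 2 * (m + 1) = (2 * m + 1) + 1 := by ring
    rw [h2, List.range_succ, List.range_succ, List.range_succ]
    simp [ih]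

theorem pvTruthTable_eq (n : Nat) :
    pvTruthTable n = (List.range (2 ^ n)).map (pvBits n) := by
  induction n with
  | zero => simp [pvTruthTable, pvBits]
  | succ n ih =>
    have hpow : 2 ^ (n + 1) = 2 * 2 ^ n := by ring
    rw [pvTruthTable, ih, hpow, range_two_mul_map (pvBits (n + 1))]
    rw [List.flatMap_map]
    have hf : (fun k => [pvBits (n+1) (2 * k), pvBits (n+1) (2 * k + 1)])
        = fun k => [pvBits n k ++ [0], pvBits n k ++ [1]] := by
      funext k
      have h1 : (2 * k) / 2 = k := by omega
      have h2 : (2 * k) % 2 = 0 := by omega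
      have h3 : (2 * k + 1) / 2 = k := by omega
      have h4 : (2 * k + 1) % 2 = 1 := by omega
      simp [pvBits, h1, h2, h3, h4]
    rw [hf]

theorem pvReduce_append (t : List Int) (ht : t ≠ []) (b : Int) :
    pvReduce (t ++ [b]) = (pvReduce t).map (fun v => v * 2 + b) := by
  match t, ht with
  | a :: rest, _ =>
    simp only [pvReduce, List.cons_append, List.foldl_append, List.foldl_cons, List.foldl_nil,
      Option.map_some, Option.some.injEq]
    simp [Int.shiftLeft_eq]
    try ring

theorem pvReduce_bits (n : Nat) (hn : 1 ≤ n) (j : Nat) :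
    pvReduce (pvBits n j) = some ((j % 2 ^ n : Nat) : Int) := by
  induction n generalizing j with
  | zero => omega
  | succ n ih =>
    by_cases h : n = 0
    · subst h
      simp [pvBits, pvReduce]
    · have hn' : 1 ≤ n := by omega
      have hne : pvBits n (j / 2) ≠ [] := by
        cases n with
        | zero => omega
        | succ m => simp [pvBits]
      rw [pvBits, pvReduce_append _ hne, ih hn']
      simp only [Option.map_some, Option.some.injEq]
      have key : j % 2 ^ (n + 1) = (j / 2 % 2 ^ n) * 2 + j % 2 := by
        have h1 : j % (2 * 2 ^ n) = j % 2 + 2 * (j / 2 % 2 ^ n) := Nat.mod_mul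
        have h2 : 2 ^ (n + 1) = 2 * 2 ^ n := by ring
        rw [h2]
        omega
      push_cast [key]
      ring

theorem table_get (n : Nat) (k : Nat) (hk : k < 2 ^ n) :
    (pvTruthTable n)[k]? = some (pvBits n k) := by
  rw [pvTruthTable_eq]
  simp [hk]

theorem pvRow (n : Nat) (hn : 1 ≤ n) (idx : Int)
    (h1 : -(2 ^ n : Int) ≤ idx) (h2 : idx < 2 ^ n) :
    (PySem.List.pyGet? (pvTruthTable n) idx).bind pvReduce
      = some (PySem.Int.mod idx (2 ^ n)) := by
  have hlen : (pvTruthTable n).length = 2 ^ n := by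
    rw [pvTruthTable_eq]; simp
  have hpos : (0:Int) < 2 ^ n := by positivity
  have hcast : ((2 ^ n : Nat) : Int) = 2 ^ n := by push_cast; ring
  rcases (show 0 ≤ idx ∨ idx < 0 by omega) with hge | hlt
  · have hk : idx.toNat < 2 ^ n := by omega
    have : PySem.List.pyGet? (pvTruthTable n) idx = (pvTruthTable n)[idx.toNat]? := by
      simp only [PySem.List.pyGet?, PySem.List.pyIdx?, hlen]
      rw [if_pos hge, if_pos (by omega)]
      rfl
    rw [this, table_get n idx.toNat hk, Option.bind_some, pvReduce_bits n hn]
    have hm : idx.toNat % 2 ^ n = idx.toNat := Nat.mod_eq_of_lt hk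
    rw [hm]
    have : PySem.Int.mod idx (2 ^ n) = idx := by
      rw [PySem.Int.mod_eq_emod_of_pos hpos]
      exact Int.emod_eq_of_lt hge h2
    rw [this]
    simp [Int.toNat_of_nonneg hge]
  · have hk : (idx + 2 ^ n).toNat < 2 ^ n := by omega
    have : PySem.List.pyGet? (pvTruthTable n) idx = (pvTruthTable n)[(idx + 2 ^ n).toNat]? := by
      simp only [PySem.List.pyGet?, PySem.List.pyIdx?, hlen]
      rw [if_neg (by omega), if_pos (by omega)]
      have he : 2 ^ n - (-idx).toNat = (idx + 2 ^ n).toNat := by omega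
      simp [he]
    rw [this, table_get n _ hk, Option.bind_some, pvReduce_bits n hn]
    have hm : (idx + 2 ^ n).toNat % 2 ^ n = (idx + 2 ^ n).toNat := Nat.mod_eq_of_lt hk
    rw [hm]
    have : PySem.Int.mod idx (2 ^ n) = idx + 2 ^ n := by
      rw [PySem.Int.mod_eq_emod_of_pos hpos]
      have e1 : idx % (2^n : Int) = (idx + 2^n * 1) % 2^n := by rw [Int.add_mul_emod_self_left]
      rw [e1]
      simp only [mul_one]
      exact Int.emod_eq_of_lt (by omega) (by omega)
    rw [this]
    congr 1
    omega

theorem pvLoop_eq (n : Nat) (hn : 1 ≤ n) (jumps idx0 : Int) :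
    ∀ (chars : List Char) (s : Int) (res : PySem.Dict String Int),
    (∀ j ∈ List.range chars.length,
        -(2 ^ n : Int) ≤ idx0 + (s + (j : Int)) * jumps ∧ idx0 + (s + (j : Int)) * jumps < 2 ^ n) →
    pvLoopA (pvTruthTable n) jumps chars (idx0 + s * jumps) res
      = some ((PySem.List.enumerate chars s).foldl
          (fun d p => d.insert (String.singleton p.2)
            (PySem.Int.mod (idx0 + p.1 * jumps) (2 ^ n))) res) := by
  intro chars
  induction chars with
  | nil => intro s res _; simp [pvLoopA, PySem.List.enumerate]
  | cons c cs ih =>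
    intro s res hb
    have hb0 := hb 0 (by simp)
    push_cast at hb0
    have hrow := pvRow n hn (idx0 + s * jumps)
      (by rw [show idx0 + s * jumps = idx0 + (s + 0) * jumps by ring]; exact hb0.1)
      (by rw [show idx0 + s * jumps = idx0 + (s + 0) * jumps by ring]; exact hb0.2)
    rw [pvLoopA, hrow]
    dsimp only
    have e : idx0 + s * jumps + jumps = idx0 + (s + 1) * jumps := by ring
    rw [e, ih (s + 1) _ (by
      intro j hj
      have hj' : j + 1 ∈ List.range (c :: cs).length := by
        simp [List.mem_range] at hj ⊢; omega
      have h := hb (j + 1) hj'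
      push_cast at h
      rw [show idx0 + (s + 1 + (j : Int)) * jumps = idx0 + (s + ((j : Int) + 1)) * jumps by ring]
      exact h)]
    rw [PySem.List.enumerate_cons]
    simp

-- ===== VERDICT (by name: the statement is the Claim_ definition above) =====
theorem create_fake_binary_assign_spec : Claim_equal_create_fake_binary_assign := by
  unfold Claim_equal_create_fake_binary_assign
  intro alphabet permutation_size index_start index_jumps _ hpre
  obtain ⟨h0, hd, hg, hbnd⟩ := hpre
  unfold Spec_create_fake_binary_assign
  unfold create_fake_binary_assign create_fake_binary_assign_alt
  rw [PySem.Str.len_eq alphabet]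
  rw [if_neg (by omega), if_neg (by omega), if_neg (by omega), if_neg (by omega)]
  rcases hd with hp1 | hemp
  · have hn : 1 ≤ permutation_size.toNat := by omega
    have hloop := pvLoop_eq permutation_size.toNat hn index_jumps (index_start - 1)
      alphabet.toList 0 PySem.Dict.empty (by
        intro j hj
        have h := hbnd j hj
        rw [show index_start - 1 + ((0:Int) + (j : Int)) * index_jumps
            = index_start - 1 + (j : Int) * index_jumps by ring]
        exact h)
    rw [show index_start - 1 + (0:Int) * index_jumps = index_start - 1 by ring] at hloop
    rw [hloop]
  · rw [hemp]
    simp [pvLoopA, PySem.List.enumerate]
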